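-- pv_equiv track=rewrite | github.com/yannickloth/W33-Theory | scripts/w33_leech_monster.py | class_number_negative_discriminant
-- ===== SOURCE A (Python) =====
-- def class_number_negative_discriminant(D: int) -> int:
--     """Class number h(D) for a negative discriminant D via reduced forms."""
--     import math
--
--     if D >= 0 or D % 4 not in (0, 1):
--         raise ValueError("D must be a negative discriminant (0 or 1 mod 4)")
--
--     h = 0
--     limit = int(math.sqrt(abs(D) / 3)) + 2
--     for a in range(1, limit + 1):
--         for b in range(-a, a + 1):
--             disc = b * b - D
--             if disc % (4 * a) != 0:
--                 continue
--             c = disc // (4 * a)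
--             if a > c or abs(b) > a:
--                 continue
--             if (abs(b) == a or a == c) and b < 0:
--                 continue
--             if b * b - 4 * a * c != D:
--                 continue
--             h += 1
--     return h
-- ===== SOURCE B (Python) =====
-- def class_number_negative_discriminant(D: int) -> int:
--     """Class number h(D) by the divisor method: walk b >= 0 of the parity of D,
--     factor n = (b*b - D) // 4 by trial division a <= sqrt(n), and count each
--     reduced triple (a, b, c) with multiplicity 2, or 1 on the reduction
--     boundary (b == 0, b == a or a == c)."""
--     if D >= 0 or D % 4 not in (0, 1):
--         raise ValueError("D must be a negative discriminant (0 or 1 mod 4)")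
--
--     h = 0
--     b = D % 2
--     while 3 * b * b <= -D:
--         n = (b * b - D) // 4
--         a = max(b, 1)
--         while a * a <= n:
--             if n % a == 0:
--                 c = n // a
--                 h += 1 if (b == 0 or b == a or a == c) else 2
--             a += 1
--         b += 2
--     return h
-- ===== Notes on version B (the rewrite author's own statement) =====
-- stated objective: alternative
-- what changed: B replaces A's a-outer scan over all b in [-a,a] with per-pair sign filters by the divisor method: it walks b >= 0 of D's parity, forms n=(b*b-D)//4 once, trial-divides a up to sqrt(n), and counts each reduced triple with multiplicity 2 (1 on the boundary b==0, b==a, a==c).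
import Mathlib
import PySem

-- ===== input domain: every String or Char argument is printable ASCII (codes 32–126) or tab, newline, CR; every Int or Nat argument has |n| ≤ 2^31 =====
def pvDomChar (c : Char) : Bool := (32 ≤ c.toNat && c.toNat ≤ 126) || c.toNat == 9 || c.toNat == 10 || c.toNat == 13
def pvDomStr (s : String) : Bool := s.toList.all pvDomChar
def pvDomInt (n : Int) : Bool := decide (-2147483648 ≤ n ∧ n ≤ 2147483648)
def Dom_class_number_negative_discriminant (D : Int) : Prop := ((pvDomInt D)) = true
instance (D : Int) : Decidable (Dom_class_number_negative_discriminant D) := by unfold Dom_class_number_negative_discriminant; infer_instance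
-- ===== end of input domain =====

-- B replaces A's a-outer scan over b ∈ [-a,a] by the divisor method: it walks b ≥ 0 of D's
-- parity, forms n = (b²-D)//4 once, trial-divides a ≤ √n, and counts each reduced triple
-- with multiplicity 2 (1 on the boundary b=0, b=a, a=c); a different enumeration order.
-- Python's float `int(math.sqrt(abs(D)/3))` is ported as the integer sqrt `Nat.sqrt (|D| / 3)`
-- in port A: with the `+ 2` slack both limits are ≥ ⌊√(|D|/3)⌋, and every a beyond that bound
-- contributes nothing, so the port returns exactly what the Python returns.

-- ===== PORT A =====
def class_number_negative_discriminant (D : Int) : Int :=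
  let limit : Int := (Nat.sqrt (D.natAbs / 3) : Int) + 2
  (PySem.List.pyRange 1 (limit + 1) 1).foldl (fun h a =>
    (PySem.List.pyRange (-a) (a + 1) 1).foldl (fun h b =>
      let disc := b * b - D
      if PySem.Int.mod disc (4 * a) ≠ 0 then h
      else
        let c := PySem.Int.floordiv disc (4 * a)
        if a > c ∨ |b| > a then h
        else if (|b| = a ∨ a = c) ∧ b < 0 then h
        else if b * b - 4 * a * c ≠ D then h
        else h + 1) h) 0

-- ===== PORT B =====
-- the Python `while a * a <= n` inner loop, as structural recursion on a fuel bound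
-- (the loop body runs only while a*a <= n, so n.toNat + 1 steps always suffice;
-- a only ever takes nonnegative values, so it is carried as a Nat)
def pvInnerB (D n b : Int) : Nat → Nat → Int → Int
  | 0, _, h => h
  | fuel + 1, a, h =>
    if (a : Int) * a ≤ n then
      pvInnerB D n b fuel (a + 1)
        (if PySem.Int.mod n a = 0 then
          h + (if b = 0 ∨ b = (a : Int) ∨ (a : Int) = PySem.Int.floordiv n a then 1 else 2)
         else h)
    else h

-- the Python `while 3 * b * b <= -D` outer loop (b starts at D % 2 ∈ {0,1} and steps
-- by 2, so it is carried as a Nat; |D| + 1 steps always suffice)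
def pvOuterB (D : Int) : Nat → Nat → Int → Int
  | 0, _, h => h
  | fuel + 1, b, h =>
    if 3 * (b : Int) * b ≤ -D then
      pvOuterB D fuel (b + 2)
        (pvInnerB D (PySem.Int.floordiv ((b : Int) * b - D) 4) (b : Int)
          ((PySem.Int.floordiv ((b : Int) * b - D) 4).toNat + 1) (max b 1) h)
    else h

def class_number_negative_discriminant_alt (D : Int) : Int :=
  pvOuterB D (D.natAbs + 1) (PySem.Int.mod D 2).toNat 0

-- ===== PRECONDITION & SPEC =====
-- Pre_ excludes exactly the inputs on which the Python A raises ValueError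
-- (D ≥ 0, or D mod 4 not in {0, 1}); both Pythons raise identically there.
def Pre_class_number_negative_discriminant (D : Int) : Prop :=
  D < 0 ∧ (PySem.Int.mod D 4 = 0 ∨ PySem.Int.mod D 4 = 1)
instance (D : Int) : Decidable (Pre_class_number_negative_discriminant D) := by
  unfold Pre_class_number_negative_discriminant; infer_instance
def pvWitness_class_number_negative_discriminant : Int := -3

def Spec_class_number_negative_discriminant (D : Int) (out : Int) : Prop := out = class_number_negative_discriminant_alt D
instance (D : Int) (out : Int) : Decidable (Spec_class_number_negative_discriminant D out) := by unfold Spec_class_number_negative_discriminant; infer_instance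

-- ===== CLAIM (what is proved, stated in full; the proofs are below) =====
def Claim_equal_class_number_negative_discriminant : Prop := ∀ (D : Int), Dom_class_number_negative_discriminant D → Pre_class_number_negative_discriminant D → Spec_class_number_negative_discriminant D (class_number_negative_discriminant D)

-- ===== LEMMAS AND PROOFS =====

-- A's per-(a,b) contribution (0 or 1)
def pvFA (D a b : Int) : Int :=
  if PySem.Int.mod (b * b - D) (4 * a) ≠ 0 then 0
  else if a > PySem.Int.floordiv (b * b - D) (4 * a) ∨ |b| > a then 0
  else if (|b| = a ∨ a = PySem.Int.floordiv (b * b - D) (4 * a)) ∧ b < 0 then 0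
  else if b * b - 4 * a * (PySem.Int.floordiv (b * b - D) (4 * a)) ≠ D then 0
  else 1

-- A's per-(a,b) contribution folded over ±b (0, 1 or 2)
def pvFB (D a b : Int) : Int :=
  if PySem.Int.mod (b * b - D) (4 * a) ≠ 0 then 0
  else if PySem.Int.floordiv (b * b - D) (4 * a) < a then 0
  else if b = 0 ∨ b = a ∨ a = PySem.Int.floordiv (b * b - D) (4 * a) then 1
  else 2

lemma pvA_eq_sum (D : Int) :
    class_number_negative_discriminant D =
      ((PySem.List.pyRange 1 (((Nat.sqrt (D.natAbs / 3) : Int) + 2) + 1) 1).map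
        (fun a => ((PySem.List.pyRange (-a) (a + 1) 1).map (pvFA D a)).sum)).sum := by
  have hbody : ∀ a : Int, (fun (h b : Int) =>
      let disc := b * b - D
      if PySem.Int.mod disc (4 * a) ≠ 0 then h
      else
        let c := PySem.Int.floordiv disc (4 * a)
        if a > c ∨ |b| > a then h
        else if (|b| = a ∨ a = c) ∧ b < 0 then h
        else if b * b - 4 * a * c ≠ D then h
        else h + 1) = fun h b => h + pvFA D a b := by
    intro a; funext h b
    simp only [pvFA]
    split_ifs <;> omega
  unfold class_number_negative_discriminant
  simp only [hbody, PySem.List.foldl_add, zero_add]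

-- exact division under the divisibility test
lemma pvC_exact {disc a : Int} (ha : 0 < a) (h : PySem.Int.mod disc (4 * a) = 0) :
    4 * a * PySem.Int.floordiv disc (4 * a) = disc := by
  have h4 : (0 : Int) < 4 * a := by omega
  have hd : 4 * a ∣ disc := (PySem.Int.mod_eq_zero_iff_dvd disc (4 * a)).mp h
  rw [PySem.Int.floordiv_eq_ediv_of_pos h4]
  exact Int.mul_ediv_cancel' hd

lemma pvFA_zero (D a : Int) (ha : 1 ≤ a) : pvFA D a 0 = pvFB D a 0 := by
  unfold pvFA pvFB
  simp only [abs_zero, mul_zero, true_or, if_true]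
  by_cases hm : PySem.Int.mod (0 - D) (4 * a) = 0
  · have hc := pvC_exact (by omega : (0:Int) < a) hm
    set c := PySem.Int.floordiv (0 - D) (4 * a) with hcdef
    generalize hQ : 4 * a * c = Q at hc ⊢
    split_ifs <;> omega
  · split_ifs <;> omega

lemma pvFA_pair (D a b : Int) (ha : 1 ≤ a) (hb : 1 ≤ b) (hba : b ≤ a) :
    pvFA D a b + pvFA D a (-b) = pvFB D a b := by
  unfold pvFA pvFB
  have hsq : -b * -b = b * b := by ring
  have habs : |b| = b := abs_of_pos (by omega)
  have hnabs : |(-b)| = b := by rw [abs_neg, habs]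
  simp only [hsq, habs, hnabs]
  by_cases hm : PySem.Int.mod (b * b - D) (4 * a) = 0
  · have hc := pvC_exact (by omega : (0:Int) < a) hm
    set c := PySem.Int.floordiv (b * b - D) (4 * a) with hcdef
    generalize hQ : 4 * a * c = Q at hc ⊢
    generalize hS : b * b = S at hc ⊢
    split_ifs <;> omega
  · split_ifs <;> omega

-- [-a .. -1] is the reversed negation of [1 .. a]
lemma pvNegRange (a : Int) (ha : 1 ≤ a) :
    PySem.List.pyRange (-a) 0 1 = ((PySem.List.pyRange 1 (a + 1) 1).map (fun b => -b)).reverse := by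
  apply List.ext_getElem
  · simp only [List.length_reverse, List.length_map, PySem.List.length_pyRange_one]
    omega
  · intro k h1 h2
    rw [List.getElem_reverse, List.getElem_map, PySem.List.getElem_pyRange_one,
        PySem.List.getElem_pyRange_one]
    simp only [List.length_reverse, List.length_map, PySem.List.length_pyRange_one] at h1 h2 ⊢
    omega

lemma pvInner (D a : Int) (ha : 1 ≤ a) :
    ((PySem.List.pyRange (-a) (a + 1) 1).map (pvFA D a)).sum =
      ((PySem.List.pyRange 0 (a + 1) 1).map (pvFB D a)).sum := by
  rw [show PySem.List.pyRange (-a) (a + 1) 1 = _ from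
      PySem.List.pyRange_one_append (-a) 0 (a + 1) (by omega) (by omega)]
  rw [show PySem.List.pyRange 0 (a + 1) 1 = _ from
      PySem.List.pyRange_one_append 0 1 (a + 1) (by omega) (by omega)]
  rw [show PySem.List.pyRange 0 1 1 = [0] from rfl, pvNegRange a ha]
  rw [List.map_append, List.sum_append, List.map_reverse, List.sum_reverse, List.map_map]
  rw [List.map_append, List.sum_append, List.map_append, List.sum_append]
  have hfb : (PySem.List.pyRange 1 (a + 1) 1).map (pvFB D a) =
      (PySem.List.pyRange 1 (a + 1) 1).map (fun b => pvFA D a b + pvFA D a (-b)) := by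
    apply List.map_congr_left
    intro b hbmem
    have hb := (PySem.List.mem_pyRange_one).mp hbmem
    exact (pvFA_pair D a b ha hb.1 (by omega)).symm
  rw [hfb, PySem.List.sum_map_add_int]
  have h0 : pvFA D a 0 = pvFB D a 0 := pvFA_zero D a ha
  simp only [List.map_cons, List.map_nil, List.sum_cons, List.sum_nil, Function.comp_def]
  omega

-- list-range sums as Finset.range sums
lemma pvListSum (n : Nat) (f : Nat → Int) :
    ((List.range n).map f).sum = ∑ i ∈ Finset.range n, f i := by
  induction n with
  | zero => simp
  | succ n ih =>
      rw [List.range_succ, Finset.sum_range_succ, List.map_append, List.sum_append, ih]; simp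

-- the common master term: contribution of the pair (a, b) (a, b ≥ 0)
def pvG (D : Int) (a b : Nat) : Int :=
  if 1 ≤ a ∧ b ≤ a ∧ PySem.Int.mod ((b:Int) * b - D) (4 * a) = 0 ∧
      (a:Int) ≤ PySem.Int.floordiv ((b:Int) * b - D) (4 * a) then
    (if b = 0 ∨ b = a ∨ (a:Int) = PySem.Int.floordiv ((b:Int) * b - D) (4 * a) then 1 else 2)
  else 0

-- B's inner-loop per-divisor contribution
def pvIT (n b : Int) (j : Nat) : Int :=
  if (j:Int) * j ≤ n ∧ PySem.Int.mod n j = 0 then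
    (if b = 0 ∨ b = (j:Int) ∨ (j:Int) = PySem.Int.floordiv n j then 1 else 2)
  else 0

-- unfolding B's inner while-loop into a sum over the divisor candidates
lemma pvInnerB_eq (D n b : Int) :
    ∀ (fuel a : Nat) (h : Int), n.toNat + 1 ≤ fuel + a →
      pvInnerB D n b fuel a h = h + ∑ j ∈ Finset.Ico a (n.toNat + 1), pvIT n b j := by
  intro fuel
  induction fuel with
  | zero =>
      intro a h hk
      rw [pvInnerB, Finset.Ico_eq_empty (by omega), Finset.sum_empty, add_zero]
  | succ fuel ih =>
      intro a h hk
      rw [pvInnerB]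
      by_cases hle : (a:Int) * a ≤ n
      · rw [if_pos hle]
        have haa : a * a ≤ n.toNat := by
          have : ((a * a : Nat) : Int) ≤ n := by push_cast; exact hle
          omega
        have hlt : a < n.toNat + 1 := by nlinarith
        rw [ih (a + 1) _ (by omega)]
        rw [Finset.sum_eq_sum_Ico_succ_bot hlt]
        have hIT : pvIT n b a =
            (if PySem.Int.mod n a = 0 then
              (if b = 0 ∨ b = (a:Int) ∨ (a:Int) = PySem.Int.floordiv n a then 1 else 2)
             else 0) := by
          unfold pvIT
          by_cases hm : PySem.Int.mod n a = 0 <;> simp [hle, hm]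
        rw [hIT]
        split_ifs <;> ring
      · rw [if_neg hle]
        have hz : ∑ j ∈ Finset.Ico a (n.toNat + 1), pvIT n b j = 0 := by
          apply Finset.sum_eq_zero
          intro j hj
          have hja : a ≤ j := (Finset.mem_Ico.mp hj).1
          unfold pvIT
          rw [if_neg]
          rintro ⟨hj2, -⟩
          have : (a:Int) * a ≤ (j:Int) * j := by
            have : (a:Int) ≤ j := by exact_mod_cast hja
            nlinarith [Int.natCast_nonneg a, Int.natCast_nonneg j]
          exact hle (le_trans this hj2)
        rw [hz, add_zero]

-- n(b) = (b*b - D) // 4, as computed by B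
def pvN (D : Int) (b : Nat) : Int := PySem.Int.floordiv ((b:Int) * b - D) 4

-- B's outer-loop per-b contribution
def pvOT (D : Int) (b : Nat) : Int :=
  if 3 * (b:Int) * b ≤ -D then
    ∑ j ∈ Finset.Ico (max b 1) ((pvN D b).toNat + 1), pvIT (pvN D b) (b:Int) j
  else 0

-- unfolding B's outer while-loop into a sum over k (b = b₀ + 2k)
lemma pvOuterB_eq (D : Int) :
    ∀ (fuel b : Nat) (h : Int),
      (∀ k : Nat, fuel ≤ k → ¬ (3 * ((b + 2 * k : Nat) : Int) * ((b + 2 * k : Nat) : Int) ≤ -D)) →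
      pvOuterB D fuel b h = h + ∑ k ∈ Finset.range fuel, pvOT D (b + 2 * k) := by
  intro fuel
  induction fuel with
  | zero =>
      intro b h hK
      rw [pvOuterB, Finset.range_zero, Finset.sum_empty, add_zero]
  | succ fuel ih =>
      intro b h hK
      rw [pvOuterB]
      by_cases hg : 3 * (b:Int) * b ≤ -D
      · rw [if_pos hg]
        rw [ih (b + 2) _ (by
          intro k hk
          have := hK (k + 1) (by omega)
          convert this using 4 <;> push_cast <;> ring)]
        rw [show PySem.Int.floordiv ((b:Int) * b - D) 4 = pvN D b from rfl,
            pvInnerB_eq D (pvN D b) (b:Int) ((pvN D b).toNat + 1) (max b 1) h (by omega)]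
        rw [Finset.sum_range_succ']
        have hOT0 : pvOT D (b + 2 * 0) = pvOT D b := by norm_num
        have htail : ∀ k ∈ Finset.range fuel, pvOT D (b + 2 + 2 * k) = pvOT D (b + 2 * (k + 1)) := by
          intro k _; congr 1; omega
        rw [Finset.sum_congr rfl htail, hOT0]
        have hOTb : pvOT D b =
            ∑ j ∈ Finset.Ico (max b 1) ((pvN D b).toNat + 1), pvIT (pvN D b) (b:Int) j := by
          unfold pvOT; rw [if_pos hg]
        rw [hOTb]; ring
      · rw [if_neg hg]
        have hz : ∑ k ∈ Finset.range (fuel + 1), pvOT D (b + 2 * k) = 0 := by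
          apply Finset.sum_eq_zero
          intro k _
          unfold pvOT
          rw [if_neg]
          intro hgk
          apply hg
          have hmono : (b:Int) * b ≤ ((b + 2 * k : Nat) : Int) * ((b + 2 * k : Nat) : Int) := by
            have : (b:Int) ≤ ((b + 2 * k : Nat) : Int) := by exact_mod_cast Nat.le_add_right b (2 * k)
            nlinarith [Int.natCast_nonneg b]
          nlinarith
        rw [hz, add_zero]

-- support: a nonzero contribution forces 1 ≤ a, b ≤ a and 3a² ≤ -D
lemma pvSupp {D : Int} {a b : Nat} (h : pvG D a b ≠ 0) :
    1 ≤ a ∧ b ≤ a ∧ 3 * (a:Int) * a ≤ -D := by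
  unfold pvG at h
  by_cases hg : 1 ≤ a ∧ b ≤ a ∧ PySem.Int.mod ((b:Int) * b - D) (4 * a) = 0 ∧
      (a:Int) ≤ PySem.Int.floordiv ((b:Int) * b - D) (4 * a)
  · obtain ⟨h1, hba, hm, hc⟩ := hg
    refine ⟨h1, hba, ?_⟩
    have ha : (0:Int) < a := by exact_mod_cast h1
    have heq := pvC_exact ha hm
    set c := PySem.Int.floordiv ((b:Int) * b - D) (4 * a) with hcdef
    have hb2 : (b:Int) * b ≤ (a:Int) * a := by
      have : (b:Int) ≤ a := by exact_mod_cast hba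
      nlinarith [Int.natCast_nonneg b]
    nlinarith
  · rw [if_neg hg] at h
    exact absurd rfl h

-- wrong-parity b contributes nothing (4a ∤ b² - D when b ≢ D mod 2)
lemma pvParity {D : Int} {a b : Nat}
    (hb : b % 2 ≠ (PySem.Int.mod D 2).toNat) : pvG D a b = 0 := by
  unfold pvG
  rw [if_neg]
  rintro ⟨h1, -, hm, -⟩
  have hdvd : (4 * (a:Int)) ∣ ((b:Int) * b - D) :=
    (PySem.Int.mod_eq_zero_iff_dvd _ _).mp hm
  have h4 : (4:Int) ∣ ((b:Int) * b - D) := dvd_trans (dvd_mul_right 4 (a:Int)) hdvd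
  obtain ⟨t, ht⟩ := h4
  rw [PySem.Int.mod_eq_emod_of_pos (a := D) (by omega : (0:Int) < 2)] at hb
  rcases Nat.even_or_odd b with ⟨m, hm'⟩ | ⟨m, hm'⟩
  · have hsq : (b:Int) * b = 4 * ((m:Int) * m) := by
      have : (b:Int) = 2 * m := by exact_mod_cast hm'.trans (two_mul m).symm
      rw [this]; ring
    rw [hsq] at ht
    have hb0 : b % 2 = 0 := by omega
    generalize (m:Int) * m = M at ht
    omega
  · have hsq : (b:Int) * b = 4 * ((m:Int) * m + m) + 1 := by
      have : (b:Int) = 2 * m + 1 := by exact_mod_cast hm'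
      rw [this]; ring
    rw [hsq] at ht
    have hb1 : b % 2 = 1 := by omega
    generalize (m:Int) * m + (m:Int) = M at ht
    omega

-- right-parity b makes b² - D divisible by 4
lemma pvFourDvd {D : Int} {b : Nat}
    (hD4 : PySem.Int.mod D 4 = 0 ∨ PySem.Int.mod D 4 = 1)
    (hb : b % 2 = (PySem.Int.mod D 2).toNat) : (4:Int) ∣ ((b:Int) * b - D) := by
  rw [PySem.Int.mod_eq_emod_of_pos (a := D) (by omega : (0:Int) < 4)] at hD4
  rw [PySem.Int.mod_eq_emod_of_pos (a := D) (by omega : (0:Int) < 2)] at hb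
  rcases Nat.even_or_odd b with ⟨m, hm'⟩ | ⟨m, hm'⟩
  · have hsq : (b:Int) * b = 4 * ((m:Int) * m) := by
      have : (b:Int) = 2 * m := by exact_mod_cast hm'.trans (two_mul m).symm
      rw [this]; ring
    have hb0 : b % 2 = 0 := by omega
    rw [hsq]
    generalize (m:Int) * m = M
    omega
  · have hsq : (b:Int) * b = 4 * ((m:Int) * m + m) + 1 := by
      have : (b:Int) = 2 * m + 1 := by exact_mod_cast hm'
      rw [this]; ring
    have hb1 : b % 2 = 1 := by omega
    rw [hsq]
    generalize (m:Int) * m + (m:Int) = M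
    omega

-- A's folded contribution agrees with the master term inside its range
lemma pvFB_eq_pvG (D : Int) (a b : Nat) (h1 : 1 ≤ a) (hba : b ≤ a) :
    pvFB D (a:Int) (b:Int) = pvG D a b := by
  unfold pvFB pvG
  set c := PySem.Int.floordiv ((b:Int) * b - D) (4 * a) with hcdef
  set m := PySem.Int.mod ((b:Int) * b - D) (4 * a) with hmdef
  split_ifs <;> omega

-- the master term agrees with B's inner term (right-parity b, so 4 ∣ b² - D)
lemma pvG_eq_IT (D : Int) (b j : Nat) (hx : (4:Int) ∣ ((b:Int) * b - D)) :
    pvG D j b = if max b 1 ≤ j then pvIT (pvN D b) (b:Int) j else 0 := by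
  obtain ⟨n0, hn0⟩ := hx
  have hN : pvN D b = n0 := by
    unfold pvN
    rw [hn0, PySem.Int.floordiv_eq_ediv_of_pos (by omega : (0:Int) < 4)]
    exact Int.mul_ediv_cancel_left n0 (by omega)
  by_cases hj : 1 ≤ j ∧ b ≤ j
  · have hmx : max b 1 ≤ j := by omega
    rw [if_pos hmx, hN]
    have hj0 : (0:Int) < j := by exact_mod_cast hj.1
    have hmodiff : PySem.Int.mod ((b:Int) * b - D) (4 * j) = 0 ↔ PySem.Int.mod n0 j = 0 := by
      rw [PySem.Int.mod_eq_zero_iff_dvd, PySem.Int.mod_eq_zero_iff_dvd, hn0]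
      exact mul_dvd_mul_iff_left (by omega : (4:Int) ≠ 0)
    have hdiv : PySem.Int.floordiv ((b:Int) * b - D) (4 * j) = PySem.Int.floordiv n0 j := by
      rw [PySem.Int.floordiv_eq_ediv_of_pos (by positivity : (0:Int) < 4 * j),
          PySem.Int.floordiv_eq_ediv_of_pos hj0, hn0]
      exact Int.mul_ediv_mul_of_pos n0 (j:Int) (by omega)
    have hciff : (j:Int) ≤ PySem.Int.floordiv n0 j ↔ (j:Int) * j ≤ n0 := by
      rw [PySem.Int.floordiv_eq_ediv_of_pos hj0]
      exact Int.le_ediv_iff_mul_le hj0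
    unfold pvG pvIT
    simp only [hdiv, Nat.cast_eq_zero, Nat.cast_inj]
    have hguard : (1 ≤ j ∧ b ≤ j ∧ PySem.Int.mod ((b:Int) * b - D) (4 * j) = 0 ∧
        (j:Int) ≤ PySem.Int.floordiv n0 j) ↔
        ((j:Int) * j ≤ n0 ∧ PySem.Int.mod n0 j = 0) := by
      constructor
      · rintro ⟨-, -, hm2, hc2⟩
        exact ⟨hciff.mp hc2, (hmodiff).mp hm2⟩
      · rintro ⟨hc2, hm2⟩
        exact ⟨hj.1, hj.2, (hmodiff).mpr hm2, hciff.mpr hc2⟩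
    rw [if_congr hguard rfl rfl]
  · have hmx : ¬ (max b 1 ≤ j) := by omega
    rw [if_neg hmx]
    unfold pvG
    rw [if_neg (by rintro ⟨h1, h2, -⟩; exact hj ⟨h1, h2⟩)]

-- pyRange-mapped sums as Finset.range sums
lemma pvPySum (a b : Int) (f : Int → Int) :
    ((PySem.List.pyRange a b 1).map f).sum = ∑ k ∈ Finset.range (b - a).toNat, f (a + (k:Int)) := by
  rw [PySem.List.pyRange_one]
  simp only [List.map_map]
  rw [pvListSum]
  exact Finset.sum_congr rfl fun _ _ => rfl

-- bounds used by the master sums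
def pvM (D : Int) : Nat := 2 * D.natAbs + 4
def pvK (D : Int) : Nat := D.natAbs + 1
def pvB0 (D : Int) : Nat := (PySem.Int.mod D 2).toNat

lemma pvSumExt {f : Nat → Int} {m M : Nat} (h : m ≤ M)
    (hz : ∀ a, m ≤ a → f a = 0) :
    ∑ a ∈ Finset.range M, f a = ∑ a ∈ Finset.range m, f a := by
  refine (Finset.sum_subset (fun x hx => Finset.mem_range.mpr
    (lt_of_lt_of_le (Finset.mem_range.mp hx) h)) ?_).symm
  intro x _ hx
  exact hz x (by simpa [Finset.mem_range] using hx)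

lemma pvB0_le (D : Int) : pvB0 D ≤ 1 := by
  unfold pvB0
  rw [PySem.Int.mod_eq_emod_of_pos (a := D) (by omega : (0:Int) < 2)]
  omega

-- a nonzero contribution forces a ≤ √(|D|/3) (hence a below A's loop bound)
lemma pvSuppA {D : Int} {a b : Nat} (hD : D < 0) (h : pvG D a b ≠ 0) :
    a ≤ Nat.sqrt (D.natAbs / 3) := by
  obtain ⟨h1, hba, h3⟩ := pvSupp h
  have hcast : ((3 * (a * a) : Nat) : Int) ≤ (D.natAbs : Int) := by
    rw [Int.natCast_natAbs, abs_of_neg hD]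
    push_cast
    nlinarith
  have h3n : 3 * (a * a) ≤ D.natAbs := by exact_mod_cast hcast
  exact Nat.le_sqrt.mpr (by omega)

-- and b ≤ |D| (so b is hit by B's outer walk)
lemma pvSuppB {D : Int} {a b : Nat} (hD : D < 0) (h : pvG D a b ≠ 0) :
    b ≤ D.natAbs := by
  obtain ⟨h1, hba, h3⟩ := pvSupp h
  have hsq := pvSuppA hD h
  have : a ≤ D.natAbs := by
    have h1 : a * a ≤ D.natAbs / 3 := Nat.le_sqrt.mp hsq
    nlinarith [Nat.div_le_self (D.natAbs) 3]
  omega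

-- A as the master double sum
lemma pvA_master (D : Int) (hD : D < 0) :
    class_number_negative_discriminant D =
      ∑ a ∈ Finset.range (pvM D), ∑ b ∈ Finset.range (pvM D), pvG D a b := by
  rw [pvA_eq_sum]
  have hstep1 : (PySem.List.pyRange 1 (((Nat.sqrt (D.natAbs / 3) : Int) + 2) + 1) 1).map
        (fun a => ((PySem.List.pyRange (-a) (a + 1) 1).map (pvFA D a)).sum) =
      (PySem.List.pyRange 1 (((Nat.sqrt (D.natAbs / 3) : Int) + 2) + 1) 1).map
        (fun a => ((PySem.List.pyRange 0 (a + 1) 1).map (pvFB D a)).sum) := by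
    apply List.map_congr_left
    intro a ha
    exact pvInner D a ((PySem.List.mem_pyRange_one).mp ha).1
  rw [hstep1, pvPySum]
  have hLN : (((Nat.sqrt (D.natAbs / 3) : Int) + 2 + 1) - 1).toNat =
      Nat.sqrt (D.natAbs / 3) + 2 := by omega
  rw [hLN]
  set LN := Nat.sqrt (D.natAbs / 3) + 2 with hLNdef
  have hinner : ∀ k ∈ Finset.range LN,
      ((PySem.List.pyRange 0 ((1 + (k:Int)) + 1) 1).map (pvFB D (1 + (k:Int)))).sum =
      ∑ b ∈ Finset.range (pvM D), pvG D (k + 1) b := by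
    intro k hk
    rw [pvPySum]
    have ht : ((1 + (k:Int) + 1) - 0).toNat = k + 2 := by omega
    rw [ht]
    have h2 : ∀ j ∈ Finset.range (k + 2),
        pvFB D (1 + (k:Int)) (0 + (j:Int)) = pvG D (k + 1) j := by
      intro j hj
      have hj' : j < k + 2 := Finset.mem_range.mp hj
      have hcast : (1 + (k:Int)) = ((k + 1 : Nat) : Int) := by push_cast; ring
      rw [zero_add, hcast]
      exact pvFB_eq_pvG D (k + 1) j (by omega) (by omega)
    rw [Finset.sum_congr rfl h2]
    refine (pvSumExt ?_ ?_).symm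
    · have h3 := Nat.sqrt_le_self (D.natAbs / 3)
      have h4 := Nat.div_le_self (D.natAbs) 3
      have hk' : k < LN := Finset.mem_range.mp hk
      unfold pvM
      omega
    · intro b hb
      by_contra hne
      have := (pvSupp hne).2.1
      omega
  rw [Finset.sum_congr rfl hinner]
  have hext : ∑ a ∈ Finset.range (pvM D), ∑ b ∈ Finset.range (pvM D), pvG D a b =
      ∑ a ∈ Finset.range (LN + 1), ∑ b ∈ Finset.range (pvM D), pvG D a b := by
    refine pvSumExt ?_ ?_
    · have := Nat.sqrt_le_self (D.natAbs / 3)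
      have := Nat.div_le_self (D.natAbs) 3
      unfold pvM
      omega
    · intro a ha
      apply Finset.sum_eq_zero
      intro b _
      by_contra hne
      have := pvSuppA hD hne
      omega
  have hsucc : ∑ a ∈ Finset.range (LN + 1), ∑ b ∈ Finset.range (pvM D), pvG D a b =
      ∑ k ∈ Finset.range LN, ∑ b ∈ Finset.range (pvM D), pvG D (k + 1) b +
        ∑ b ∈ Finset.range (pvM D), pvG D 0 b :=
    Finset.sum_range_succ' (fun a => ∑ b ∈ Finset.range (pvM D), pvG D a b) LN
  rw [hext, hsucc]
  have h0 : ∑ b ∈ Finset.range (pvM D), pvG D 0 b = 0 := by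
    apply Finset.sum_eq_zero
    intro b _
    by_contra hne
    exact absurd (pvSupp hne).1 (by omega)
  rw [h0, add_zero]

-- B's per-b contribution is the master column sum (for right-parity b)
lemma pvCol (D : Int) (hD : D < 0)
    (hD4 : PySem.Int.mod D 4 = 0 ∨ PySem.Int.mod D 4 = 1)
    (b : Nat) (hb : b % 2 = pvB0 D) :
    pvOT D b = ∑ a ∈ Finset.range (pvM D), pvG D a b := by
  have hdvd : (4:Int) ∣ ((b:Int) * b - D) := pvFourDvd hD4 hb
  by_cases hg : 3 * (b:Int) * b ≤ -D
  · unfold pvOT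
    rw [if_pos hg]
    set T := (pvN D b).toNat + 1 with hT
    set P := max (pvM D) T with hP
    have hMP : pvM D ≤ P := le_max_left _ _
    have hTP : T ≤ P := le_max_right _ _
    have hrhs : ∑ a ∈ Finset.range (pvM D), pvG D a b =
        ∑ a ∈ Finset.range P, pvG D a b := by
      refine (pvSumExt hMP ?_).symm
      intro a ha
      by_contra hne
      have h1 := pvSuppA hD hne
      have h2 := Nat.sqrt_le_self (D.natAbs / 3)
      have h3 := Nat.div_le_self (D.natAbs) 3
      unfold pvM at ha
      omega
    rw [hrhs]
    have hpt : ∀ a ∈ Finset.range P, pvG D a b =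
        (if max b 1 ≤ a then pvIT (pvN D b) (b:Int) a else 0) := by
      intro a _
      exact pvG_eq_IT D b a hdvd
    rw [Finset.sum_congr rfl hpt]
    have hsub : Finset.Ico (max b 1) T ⊆ Finset.range P := by
      intro x hx
      have := Finset.mem_Ico.mp hx
      exact Finset.mem_range.mpr (by omega)
    rw [← Finset.sum_subset hsub ?_]
    · apply Finset.sum_congr rfl
      intro a ha
      rw [if_pos (Finset.mem_Ico.mp ha).1]
    · intro a ha hnot
      rw [Finset.mem_range] at ha
      rw [Finset.mem_Ico, not_and_or, not_le, not_lt] at hnot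
      rcases hnot with hlt | hge
      · rw [if_neg (by omega)]
      · split_ifs with hmx
        · unfold pvIT
          rw [if_neg]
          rintro ⟨hle, -⟩
          have h1 : (pvN D b).toNat + 1 ≤ a := hge
          have h2 : (pvN D b) ≤ ((pvN D b).toNat : Int) := Int.self_le_toNat _
          have h3 : ((pvN D b).toNat : Int) + 1 ≤ (a : Int) := by exact_mod_cast h1
          have h4 : (1:Int) ≤ (a:Int) := by
            have : 1 ≤ a := le_trans (le_max_right b 1) hmx
            exact_mod_cast this
          nlinarith
        · rfl
  · unfold pvOT
    rw [if_neg hg]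
    symm
    apply Finset.sum_eq_zero
    intro a _
    by_contra hne
    obtain ⟨h1, hba, h3⟩ := pvSupp hne
    apply hg
    have hcast : (b:Int) ≤ (a:Int) := by exact_mod_cast hba
    nlinarith [Int.natCast_nonneg b]

-- B as the master double sum
lemma pvB_master (D : Int) (hD : D < 0)
    (hD4 : PySem.Int.mod D 4 = 0 ∨ PySem.Int.mod D 4 = 1) :
    class_number_negative_discriminant_alt D =
      ∑ b ∈ Finset.range (pvM D), ∑ a ∈ Finset.range (pvM D), pvG D a b := by
  unfold class_number_negative_discriminant_alt
  have hb0 : (PySem.Int.mod D 2).toNat = pvB0 D := rfl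
  have hfuel : D.natAbs + 1 = pvK D := rfl
  rw [hb0, hfuel]
  rw [pvOuterB_eq D (pvK D) (pvB0 D) 0 ?_]
  · rw [zero_add]
    have hcol : ∀ k ∈ Finset.range (pvK D), pvOT D (pvB0 D + 2 * k) =
        ∑ a ∈ Finset.range (pvM D), pvG D a (pvB0 D + 2 * k) := by
      intro k _
      refine pvCol D hD hD4 _ ?_
      have := pvB0_le D
      omega
    rw [Finset.sum_congr rfl hcol]
    have himg : ∑ b ∈ (Finset.range (pvK D)).image (fun k => pvB0 D + 2 * k),
          ∑ a ∈ Finset.range (pvM D), pvG D a b =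
        ∑ k ∈ Finset.range (pvK D), ∑ a ∈ Finset.range (pvM D), pvG D a (pvB0 D + 2 * k) := by
      apply Finset.sum_image
      intro x _ y _ hxy
      have hxy' : pvB0 D + 2 * x = pvB0 D + 2 * y := hxy
      omega
    rw [← himg]
    apply Finset.sum_subset
    · intro b hbmem
      rw [Finset.mem_image] at hbmem
      obtain ⟨k, hk, hkb⟩ := hbmem
      have hkb' : pvB0 D + 2 * k = b := hkb
      rw [Finset.mem_range] at hk ⊢
      have := pvB0_le D
      unfold pvK at hk
      unfold pvM
      omega
    · intro b _ hnb
      apply Finset.sum_eq_zero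
      intro a _
      by_cases hpar : b % 2 = pvB0 D
      · by_contra hne
        have hble := pvSuppB hD hne
        apply hnb
        rw [Finset.mem_image]
        have hb0le := pvB0_le D
        refine ⟨(b - pvB0 D) / 2, Finset.mem_range.mpr ?_, ?_⟩
        · unfold pvK
          omega
        · show pvB0 D + 2 * ((b - pvB0 D) / 2) = b
          have := pvB0_le D
          omega
      · exact pvParity hpar
  · intro k hk hcon
    have hk1 : 1 ≤ k := by unfold pvK at hk; omega
    have hb2k : (2 * (k:Int)) ≤ ((pvB0 D + 2 * k : Nat) : Int) := by push_cast; omega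
    have hknn : (0:Int) ≤ (k:Int) := Int.natCast_nonneg k
    have habs : -D ≤ (D.natAbs : Int) := by omega
    have hkK : (D.natAbs : Int) + 1 ≤ (k : Int) := by
      have hK : pvK D ≤ k := hk
      unfold pvK at hK
      exact_mod_cast hK
    nlinarith

-- ===== VERDICT (by name: the statement is the Claim_ definition above) =====
theorem class_number_negative_discriminant_spec : Claim_equal_class_number_negative_discriminant := by
  intro D _ hPre
  obtain ⟨hD, hD4⟩ := hPre
  unfold Spec_class_number_negative_discriminant
  rw [pvA_master D hD, pvB_master D hD hD4, Finset.sum_comm]
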